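-- pv_equiv track=rewrite | github.com/palcu/algo | Contests/CodeJam-2015/pr2/pr2.py | solve
-- ===== SOURCE A (Python) =====
-- def get_pasi(x, i):
--     """Numarul de pasi pentru a imparti x in suma de numere mai mici sau egale
--     cu i.
--     """
--     if x <= i:
--         return 0
--
--     jumate = x // 2
--     cealalta_jumate = x - jumate
--     return 1 + get_pasi(jumate, i) + get_pasi(cealalta_jumate, i)
--
-- def solve(plates):
--     sol = max(plates)
--     for i in range(1, max(plates) + 1):
--         sol_local = 0
--         for plate in plates:
--             # import ipdb; ipdb.set_trace()
--             sol_local += get_pasi(plate, i)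
--         sol_local += i
--         sol = min(sol, sol_local)
--     return sol
-- ===== SOURCE B (Python) =====
-- def solve(plates):
--     # Closed-form cut count: halving x until all pieces are <= i makes
--     # sum over k of clamp(x - i*2^k, 0, 2^k) cuts; computed by a doubling
--     # loop instead of the exponential-size recursion.
--     m = max(plates)
--     if m < 1:
--         return m
--     best = m
--     for i in range(1, m + 1):
--         total = i
--         for p in plates:
--             w = 1
--             while i * w < p:
--                 total += min(w, p - i * w)
--                 w *= 2
--         best = min(best, total)
--     return best
-- ===== Notes on version B (the rewrite author's own statement) =====
-- stated objective: faster
-- what changed: The halving recursion get_pasi (one call per resulting piece, ~p/i calls per plate) is replaced by a closed-form doubling loop summing clamp(p - i*2^k, 0, 2^k) over k, O(log(p/i)) per plate; max(plates) is computed once with an early return when it is < 1.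
-- outside the precondition, e.g. on solve([]): A raises ValueError, B raises ValueError
import Mathlib
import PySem

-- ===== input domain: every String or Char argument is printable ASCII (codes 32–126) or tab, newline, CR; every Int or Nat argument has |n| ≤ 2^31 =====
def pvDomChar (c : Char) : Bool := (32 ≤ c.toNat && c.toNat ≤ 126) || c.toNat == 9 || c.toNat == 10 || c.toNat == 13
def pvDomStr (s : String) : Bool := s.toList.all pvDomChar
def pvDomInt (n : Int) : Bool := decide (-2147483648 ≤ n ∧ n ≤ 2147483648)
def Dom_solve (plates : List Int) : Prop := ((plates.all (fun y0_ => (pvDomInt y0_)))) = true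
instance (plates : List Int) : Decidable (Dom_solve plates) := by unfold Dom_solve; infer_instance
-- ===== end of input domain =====

-- B replaces A's halving recursion by a closed-form doubling loop (objective: faster).

-- ===== PORT A =====
-- get_pasi, with a fuel argument as a termination device only: solve calls it
-- with i ≥ 1, where fuel x.toNat is always sufficient (each recursive call
-- strictly decreases x.toNat).
def pasiGo : Nat → Int → Int → Int
  | 0, _, _ => 0
  | f+1, x, i =>
    if x ≤ i then 0
    else
      let jumate := PySem.Int.floordiv x 2
      let cealalta_jumate := x - jumate
      1 + pasiGo f jumate i + pasiGo f cealalta_jumate i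

def get_pasi (x i : Int) : Int := pasiGo x.toNat x i

def solve (plates : List Int) : Int :=
  match PySem.List.max? plates (fun y => y) with
  | none => 0  -- unreachable under Pre_solve: Python raises ValueError on max([])
  | some sol0 =>
    let m := match PySem.List.max? plates (fun y => y) with
             | none => 0
             | some m => m
    (PySem.List.pyRange 1 (m + 1) 1).foldl
      (fun sol i =>
        let sol_local := plates.foldl (fun s plate => s + get_pasi plate i) 0
        min sol (sol_local + i))
      sol0

-- ===== PORT B =====
-- the while loop of Source B, with a fuel argument as a termination device only:
-- for i ≥ 1 (the only calls solve_alt makes) fuel p.toNat is always sufficient.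
def cutsGo : Nat → Int → Int → Int → Int → Int
  | 0, _, _, _, total => total
  | f+1, p, i, w, total =>
    if i * w < p then cutsGo f p i (2 * w) (total + min w (p - i * w))
    else total

def solve_alt (plates : List Int) : Int :=
  match PySem.List.max? plates (fun y => y) with
  | none => 0  -- unreachable under Pre_solve: Python raises ValueError on max([])
  | some m =>
    if m < 1 then m
    else
      (PySem.List.pyRange 1 (m + 1) 1).foldl
        (fun best i =>
          min best (plates.foldl (fun total p => cutsGo p.toNat p i 1 total) i))
        m

-- ===== PRECONDITION & SPEC =====
-- Pre_ excludes only the empty list, on which Python's max([]) raises ValueError.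
def Pre_solve (plates : List Int) : Prop := plates ≠ []
instance (plates : List Int) : Decidable (Pre_solve plates) := by unfold Pre_solve; infer_instance
def pvWitness_solve : List Int := [3]

def Spec_solve (plates : List Int) (out : Int) : Prop := out = solve_alt plates
instance (plates : List Int) (out : Int) : Decidable (Spec_solve plates out) := by unfold Spec_solve; infer_instance

-- ===== CLAIM (what is proved, stated in full; the proofs are below) =====
def Claim_equal_solve : Prop := ∀ (plates : List Int), Dom_solve plates → Pre_solve plates → Spec_solve plates (solve plates)

-- ===== LEMMAS AND PROOFS =====

-- when the loop guard is false, cutsGo returns its accumulator at any fuel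
theorem cutsGo_stop (f : Nat) {p i w : Int} (t : Int) (h : ¬ i * w < p) :
    cutsGo f p i w t = t := by
  cases f with
  | zero => rfl
  | succ f => simp [cutsGo, h]

-- the accumulator merely shifts the result
theorem cutsGo_acc (f : Nat) (p i : Int) : ∀ (w t : Int),
    cutsGo f p i w t = t + cutsGo f p i w 0 := by
  induction f with
  | zero => intro w t; simp [cutsGo]
  | succ f ih =>
    intro w t
    by_cases h : i * w < p
    · simp only [cutsGo, if_pos h]
      rw [ih, ih (2 * w) (0 + min w (p - i * w))]
      ring
    · simp [cutsGo, h]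

-- fuel irrelevance: any fuel ≥ (p - i*w).toNat computes the same value
theorem cutsGo_fuel : ∀ (f : Nat) (g : Nat) (p i w t : Int), 1 ≤ i → 1 ≤ w →
    (p - i * w).toNat ≤ f → (p - i * w).toNat ≤ g →
    cutsGo f p i w t = cutsGo g p i w t := by
  intro f
  induction f with
  | zero =>
    intro g p i w t hi hw hf hg
    have h : ¬ i * w < p := by omega
    rw [cutsGo_stop _ _ h, cutsGo_stop _ _ h]
  | succ f ih =>
    intro g p i w t hi hw hf hg
    by_cases h : i * w < p
    · have hiw : (1:Int) ≤ i * w := le_trans hw (le_mul_of_one_le_left (by omega) hi)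
      have hmul : i * (2 * w) = 2 * (i * w) := by ring
      obtain ⟨g', rfl⟩ : ∃ g', g = g' + 1 := by
        cases g with
        | zero => exact absurd hg (by omega)
        | succ g' => exact ⟨g', rfl⟩
      simp only [cutsGo, if_pos h]
      exact ih g' p i (2 * w) _ hi (by omega) (by omega) (by omega)
    · rw [cutsGo_stop _ _ h, cutsGo_stop _ _ h]

-- the balanced-split identity: halving p = u + v (u ≤ v ≤ u + 1) splits the
-- doubling loop's sum exactly
theorem cutsGo_split : ∀ (f : Nat) (i w u v : Int), 1 ≤ i → 1 ≤ w →
    u ≤ v → v ≤ u + 1 →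
    cutsGo f (u + v) i (2 * w) 0 = cutsGo f u i w 0 + cutsGo f v i w 0 := by
  intro f
  induction f with
  | zero => intro i w u v _ _ _ _; simp [cutsGo]
  | succ f ih =>
    intro i w u v hi hw huv hvu
    have hiw : (1:Int) ≤ i * w := le_trans hw (le_mul_of_one_le_left (by omega) hi)
    have hmul2 : i * (2 * w) = 2 * (i * w) := by ring
    have hmul4 : i * (2 * (2 * w)) = 4 * (i * w) := by ring
    by_cases hL : i * (2 * w) < u + v
    · by_cases ha : i * w < u
      · have hb : i * w < v := lt_of_lt_of_le ha huv
        simp only [cutsGo, if_pos hL, if_pos ha, if_pos hb]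
        rw [cutsGo_acc, cutsGo_acc f u, cutsGo_acc f v,
            ih i (2 * w) u v hi (by omega) huv hvu]
        have hm : min (2 * w) (u + v - i * (2 * w)) =
            min w (u - i * w) + min w (v - i * w) := by
          rcases le_total w (u - i * w) with h1 | h1 <;>
            rcases le_total w (v - i * w) with h2 | h2 <;>
              rw [min_def, min_def, min_def] <;> split_ifs <;> omega
        omega
      · by_cases hb : i * w < v
        · -- forced: v = u + 1 and i * w = u
          have hu : i * w = u := by omega
          simp only [cutsGo, if_pos hL, if_neg ha, if_pos hb]
          have hL2 : ¬ i * (2 * (2 * w)) < u + v := by omega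
          have hb2 : ¬ i * (2 * w) < v := by omega
          rw [cutsGo_acc, cutsGo_stop _ _ hL2, cutsGo_acc f v, cutsGo_stop _ _ hb2]
          have hm : min (2 * w) (u + v - i * (2 * w)) = 1 := by
            rw [min_def]; split_ifs <;> omega
          have hm2 : min w (v - i * w) = 1 := by
            rw [min_def]; split_ifs <;> omega
          omega
        · exact absurd hL (by omega)
    · have ha : ¬ i * w < u := by omega
      have hb : ¬ i * w < v := by omega
      rw [cutsGo_stop _ _ hL, cutsGo_stop _ _ ha, cutsGo_stop _ _ hb]
      omega

-- main bridge: A's recursion equals B's doubling loop (for i ≥ 1)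
theorem pasiGo_eq_cutsGo : ∀ (f : Nat) (x i : Int), 1 ≤ i → x.toNat ≤ f →
    pasiGo f x i = cutsGo x.toNat x i 1 0 := by
  intro f
  induction f with
  | zero =>
    intro x i hi hf
    have h : x.toNat = 0 := by omega
    rw [h]; rfl
  | succ f ih =>
    intro x i hi hf
    by_cases hxi : x ≤ i
    · rw [cutsGo_stop _ _ (by omega : ¬ i * 1 < x)]
      simp [pasiGo, hxi]
    · have hx2 : (2:Int) ≤ x := by omega
      have hu : PySem.Int.floordiv x 2 = x / 2 :=
        PySem.Int.floordiv_eq_ediv_of_pos (by omega)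
      have hub : 1 ≤ x / 2 ∧ x / 2 ≤ x - 1 := by omega
      simp only [pasiGo, if_neg hxi]
      rw [hu, ih (x / 2) i hi (by omega), ih (x - x / 2) i hi (by omega)]
      obtain ⟨n, hn⟩ : ∃ n, x.toNat = n + 1 := ⟨x.toNat - 1, by omega⟩
      rw [hn]
      simp only [cutsGo, if_pos (by omega : i * 1 < x)]
      rw [cutsGo_acc n x i (2 * 1) (0 + min 1 (x - i * 1))]
      have hsp := cutsGo_split n i 1 (x / 2) (x - x / 2) hi le_rfl (by omega) (by omega)
      rw [show x / 2 + (x - x / 2) = x by ring] at hsp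
      rw [hsp,
          cutsGo_fuel n (x / 2).toNat (x / 2) i 1 0 hi le_rfl (by omega) (by omega),
          cutsGo_fuel n (x - x / 2).toNat (x - x / 2) i 1 0 hi le_rfl (by omega) (by omega)]
      have hm : min (1:Int) (x - i * 1) = 1 := by omega
      omega

-- the A-side accumulator shifts out of the plate fold
theorem foldl_add_shift (g : Int → Int) : ∀ (l : List Int) (c : Int),
    l.foldl (fun s p => s + g p) c = c + l.foldl (fun s p => s + g p) 0 := by
  intro l
  induction l with
  | nil => intro c; simp
  | cons a l ih =>
    intro c
    simp only [List.foldl_cons]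
    rw [ih (c + g a), ih (0 + g a)]
    ring

-- the two per-i plate folds agree (for i ≥ 1)
theorem fold_plates_eq (i : Int) (hi : 1 ≤ i) : ∀ (l : List Int) (c : Int),
    l.foldl (fun total p => cutsGo p.toNat p i 1 total) c =
    l.foldl (fun s p => s + get_pasi p i) c := by
  intro l
  induction l with
  | nil => intro c; rfl
  | cons p l ih =>
    intro c
    simp only [List.foldl_cons]
    rw [ih, cutsGo_acc, get_pasi, pasiGo_eq_cutsGo p.toNat p i hi le_rfl]

-- ===== VERDICT (by name: the statement is the Claim_ definition above) =====
theorem solve_spec : Claim_equal_solve := by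
  intro plates _ hpre
  unfold Spec_solve solve solve_alt
  cases hmax : PySem.List.max? plates (fun y => y) with
  | none => exact absurd ((PySem.List.max?_eq_none_iff _ _).mp hmax) hpre
  | some m =>
    simp only
    by_cases hm : m < 1
    · rw [if_pos hm, PySem.List.pyRange_one_eq_nil (by omega)]
      rfl
    · rw [if_neg hm]
      refine PySem.List.foldl_congr_mem' _ _ _ _ ?_
      intro i hi acc
      have h1i : 1 ≤ i := (PySem.List.mem_pyRange_one.mp hi).1
      rw [fold_plates_eq i h1i,
          foldl_add_shift (fun p => get_pasi p i) plates i]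
      congr 1
      omega
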